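-- pv_equiv track=rewrite | github.com/hoang-nguyens/GA-for-robot-map-planning | GA.py | safety_second_level
-- ===== SOURCE A (Python) =====
-- second_level_direction = [(-2, 2), (-1, 2), (0, 2), (1, 2), (2, 2), (2, 1), (2, 0), (2, -2), (1, -2), (0, -2), (-1, -2),
--                           (-2, -2), (-2, -1), (-2, 0), (-2, 1)]
--
-- def safety_second_level(grid, path):
--     dangerous = 0
--     for node in path:
--         x, y = node
--         for dr, dc in second_level_direction:
--             nx, ny = x + dr, y + dc
--             if 0 <= nx < len(grid) and 0 <= ny < len(grid[0]) and grid[nx][ny] == 1: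
--                 dangerous += 1
--                 break
--     return dangerous
-- ===== SOURCE B (Python) =====
-- second_level_direction = [(-2, 2), (-1, 2), (0, 2), (1, 2), (2, 2), (2, 1), (2, 0), (2, -2), (1, -2), (0, -2), (-1, -2),
--                           (-2, -2), (-2, -1), (-2, 0), (-2, 1)]
--
-- def safety_second_level(grid, path):
--     danger = {(r - dr, c - dc)
--               for r, row in enumerate(grid)
--               for c, v in enumerate(row) if v == 1
--               for dr, dc in second_level_direction}
--     return sum(1 for node in path if node in danger)
-- ===== Notes on version B (the rewrite author's own statement) =====
-- stated objective: alternative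
-- what changed: B precomputes the set of all danger nodes by scanning the grid once for obstacle cells and negating the offsets, then counts path membership in that set, instead of probing the 15 offsets per path node with a break.
-- outside the precondition, e.g. on safety_second_level([[0], [0, 1]], [(0, -1)]): A returns 0, B returns 1; on safety_second_level([[0, 0, 0], [0]], [(1, -1)]): A raises IndexError, B returns 0
import Mathlib
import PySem

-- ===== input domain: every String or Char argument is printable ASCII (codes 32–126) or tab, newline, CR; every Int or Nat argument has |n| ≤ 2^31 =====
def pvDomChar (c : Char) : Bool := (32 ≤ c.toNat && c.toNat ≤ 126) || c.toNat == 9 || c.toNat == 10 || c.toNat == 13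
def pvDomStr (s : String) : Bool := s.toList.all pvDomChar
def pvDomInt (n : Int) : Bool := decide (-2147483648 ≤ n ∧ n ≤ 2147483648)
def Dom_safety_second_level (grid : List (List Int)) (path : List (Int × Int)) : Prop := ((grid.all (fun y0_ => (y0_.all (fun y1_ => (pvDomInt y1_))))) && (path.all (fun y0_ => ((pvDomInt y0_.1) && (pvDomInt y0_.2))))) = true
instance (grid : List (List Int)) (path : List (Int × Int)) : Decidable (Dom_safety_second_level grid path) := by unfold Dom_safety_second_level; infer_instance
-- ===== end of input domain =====

-- B replaces A's per-node probing of 15 offsets (with break) by a precomputed danger-node set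
-- built from the obstacle cells; alternative decomposition, same values on rectangular grids.


-- ===== PORT A =====
def secondLevelDirection : List (Int × Int) :=
  [(-2, 2), (-1, 2), (0, 2), (1, 2), (2, 2), (2, 1), (2, 0), (2, -2), (1, -2), (0, -2), (-1, -2),
   (-2, -2), (-2, -1), (-2, 0), (-2, 1)]

-- A's inner 'for dr, dc in second_level_direction: … break' loop; returns the increment to `dangerous` (1 on the break-hit, else 0).
-- len(grid[0]) is ported as the length of (pyGet? grid 0).getD []: Python only evaluates it when 0 <= nx < len(grid), i.e. grid ≠ [],
-- where the two agree; grid[nx][ny] is ported totally via pyGet? (none — Python's IndexError on ragged grids — compares ≠ some 1;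
-- Pre_ excludes ragged grids, so inside Pre_ the access never raises).
def safetyInner (grid : List (List Int)) (x y : Int) : List (Int × Int) → Int
  | [] => 0
  | d :: rest =>
    let nx := x + d.1
    let ny := y + d.2
    if 0 ≤ nx ∧ nx < (grid.length : Int) ∧ 0 ≤ ny ∧ ny < (((PySem.List.pyGet? grid 0).getD []).length : Int) ∧
        PySem.List.pyGet? ((PySem.List.pyGet? grid nx).getD []) ny = some 1
    then 1 else safetyInner grid x y rest

def safety_second_level (grid : List (List Int)) (path : List (Int × Int)) : Int :=
  path.foldl (fun dangerous node => dangerous + safetyInner grid node.1 node.2 secondLevelDirection) 0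

-- ===== PORT B =====
-- the set comprehension: all nodes from which some obstacle cell (r,c) of the grid lies at a second-level offset
def dangerSet (grid : List (List Int)) : PySem.Set (Int × Int) :=
  PySem.Set.ofList ((PySem.List.enumerate grid 0).flatMap (fun rrow =>
    ((PySem.List.enumerate rrow.2 0).filter (fun cv => cv.2 == 1)).flatMap (fun cv =>
      secondLevelDirection.map (fun d => (rrow.1 - d.1, cv.1 - d.2)))))

def safety_second_level_alt (grid : List (List Int)) (path : List (Int × Int)) : Int :=
  let danger := dangerSet grid
  path.foldl (fun acc node => if PySem.Set.contains danger node then acc + 1 else acc) 0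

-- ===== PRECONDITION & SPEC =====
-- Pre_ excludes the inputs on which A's use of len(grid[0]) as the column bound for EVERY row misbehaves on ragged grids:
-- (1) grids with an obstacle (value 1) in a column ≥ len(grid[0]) — A never checks those cells, and (2) inputs where some
-- probed cell grid[nx][ny] has ny beyond row nx's actual length — there Python A raises IndexError.
def Pre_safety_second_level (grid : List (List Int)) (path : List (Int × Int)) : Prop :=
  (∀ row ∈ grid, ∀ j : Nat, j < row.length → (grid.headD []).length ≤ j → row[j]! ≠ 1) ∧
  (∀ node ∈ path, ∀ d ∈ secondLevelDirection,
    0 ≤ node.1 + d.1 → node.1 + d.1 < (grid.length : Int) →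
    0 ≤ node.2 + d.2 → node.2 + d.2 < ((grid.headD []).length : Int) →
    node.2 + d.2 < ((grid.getD (node.1 + d.1).toNat []).length : Int))
instance (grid : List (List Int)) (path : List (Int × Int)) : Decidable (Pre_safety_second_level grid path) := by unfold Pre_safety_second_level; infer_instance

def pvWitness_safety_second_level : List (List Int) × (List (Int × Int)) :=
  ([[0, 1], [0, 0]], [(0, 0), (2, 3)])

def Spec_safety_second_level (grid : List (List Int)) (path : List (Int × Int)) (out : Int) : Prop := out = safety_second_level_alt grid path
instance (grid : List (List Int)) (path : List (Int × Int)) (out : Int) : Decidable (Spec_safety_second_level grid path out) := by unfold Spec_safety_second_level; infer_instance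

-- ===== CLAIM (what is proved, stated in full; the proofs are below) =====
def Claim_equal_safety_second_level : Prop := ∀ (grid : List (List Int)) (path : List (Int × Int)), Dom_safety_second_level grid path → Pre_safety_second_level grid path → Spec_safety_second_level grid path (safety_second_level grid path)

-- ===== LEMMAS AND PROOFS =====

-- the condition of A's inner if, as a proposition about an offset d (abbrev so decidability is inferred)
abbrev CondA (grid : List (List Int)) (x y : Int) (d : Int × Int) : Prop :=
  0 ≤ x + d.1 ∧ x + d.1 < (grid.length : Int) ∧ 0 ≤ y + d.2 ∧ y + d.2 < (((PySem.List.pyGet? grid 0).getD []).length : Int) ∧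
  PySem.List.pyGet? ((PySem.List.pyGet? grid (x + d.1)).getD []) (y + d.2) = some 1

lemma safetyInner_eq (grid : List (List Int)) (x y : Int) (l : List (Int × Int)) :
    safetyInner grid x y l = if ∃ d ∈ l, CondA grid x y d then 1 else 0 := by
  induction l with
  | nil => simp [safetyInner]
  | cons d rest ih =>
    rw [safetyInner]
    by_cases h : CondA grid x y d
    · rw [if_pos h, if_pos ⟨d, List.mem_cons_self, h⟩]
    · rw [if_neg h, ih]
      congr 1
      simp only [List.mem_cons, eq_iff_iff]
      constructor
      · rintro ⟨e, he, hc⟩; exact ⟨e, Or.inr he, hc⟩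
      · rintro ⟨e, he, hc⟩
        rcases he with rfl | he
        · exact absurd hc h
        · exact ⟨e, he, hc⟩

lemma mem_danger (grid : List (List Int))
    (hobs : ∀ row ∈ grid, ∀ j : Nat, j < row.length → (grid.headD []).length ≤ j → row[j]! ≠ 1) (p : Int × Int) :
    p ∈ dangerSet grid ↔ ∃ d ∈ secondLevelDirection, CondA grid p.1 p.2 d := by
  unfold dangerSet
  rw [PySem.Set.mem_ofList]
  simp only [List.mem_flatMap, List.mem_filter, List.mem_map, PySem.List.mem_enumerate_iff]
  constructor
  · rintro ⟨rrow, ⟨k, hk, rfl⟩, cv, ⟨⟨j, hj, rfl⟩, hv⟩, d, hd, hp⟩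
    refine ⟨d, hd, ?_⟩
    simp only [zero_add] at hp hv hj ⊢
    have hx : p.1 + d.1 = (k : Int) := by rw [← hp]; ring
    have hy : p.2 + d.2 = (j : Int) := by rw [← hp]; ring
    have hjw : j < (grid.headD []).length := by
      by_contra hge
      exact hobs _ (List.getElem_mem hk) j hj (by omega)
        (by rw [getElem!_pos grid[k] j hj]; simpa using hv)
    refine ⟨by omega, by omega, by omega, ?_, ?_⟩
    · have h0 : (PySem.List.pyGet? grid 0).getD [] = grid.headD [] := by
        cases grid with
        | nil => simp at hk
        | cons r rs => simp
      rw [h0]; omega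
    · rw [hx, hy]
      simp only [PySem.List.pyGet?_natCast, List.getElem?_eq_getElem hk, Option.getD_some,
        List.getElem?_eq_getElem hj]
      simpa using hv
  · rintro ⟨d, hd, h1, h2, h3, h4, h5⟩
    have hk : (p.1 + d.1).toNat < grid.length := by omega
    rw [PySem.List.pyGet?_of_nonneg grid h1, List.getElem?_eq_getElem hk] at h5
    simp only [Option.getD_some] at h5
    rw [PySem.List.pyGet?_of_nonneg _ h3] at h5
    have hj : (p.2 + d.2).toNat < (grid[(p.1 + d.1).toNat]).length := by
      by_contra hge
      rw [List.getElem?_eq_none (by omega)] at h5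
      simp at h5
    rw [List.getElem?_eq_getElem hj] at h5
    refine ⟨(((p.1 + d.1).toNat : Int), grid[(p.1 + d.1).toNat]), ⟨(p.1 + d.1).toNat, hk, by simp⟩,
      (((p.2 + d.2).toNat : Int), grid[(p.1 + d.1).toNat][(p.2 + d.2).toNat]),
      ⟨⟨(p.2 + d.2).toNat, hj, by simp⟩, by simpa using h5⟩, d, hd, ?_⟩
    have e1 : ((p.1 + d.1).toNat : Int) = p.1 + d.1 := by omega
    have e2 : ((p.2 + d.2).toNat : Int) = p.2 + d.2 := by omega
    rw [e1, e2]
    ext <;> simp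

-- ===== VERDICT (by name: the statement is the Claim_ definition above) =====
theorem safety_second_level_spec : Claim_equal_safety_second_level := by
  intro grid path _ hpre
  unfold Spec_safety_second_level
  simp only [safety_second_level, safety_second_level_alt]
  have hstep : (fun (dangerous : Int) (node : Int × Int) => dangerous + safetyInner grid node.1 node.2 secondLevelDirection)
      = fun (acc : Int) (node : Int × Int) => if PySem.Set.contains (dangerSet grid) node then acc + 1 else acc := by
    funext acc node
    rw [safetyInner_eq]
    by_cases hm : node ∈ dangerSet grid
    · rw [if_pos ((mem_danger grid hpre.1 node).mp hm),
        if_pos (by simpa [PySem.Set.contains_iff] using hm)]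
    · rw [if_neg (fun hc => hm ((mem_danger grid hpre.1 node).mpr hc)),
        if_neg (by simpa [PySem.Set.contains_iff] using hm)]
      ring
  rw [hstep]
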